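-- pv_equiv track=rewrite | github.com/South-to-Southern/The-optimization-of-industrial-production-shop-scheduling-time | initPop.py | findBestLocation
-- ===== SOURCE A (Python) =====
-- def findBestLocation(chromosome,enterJob,rejectionPenalty,ProcessingTime,
--                         DeteriorationProcessingTime):
--     tmp = []
--     for machine,i in enumerate(chromosome):
--         if machine == len(chromosome) - 1:
--             tmp.append(rejectionPenalty)
--         elif i:
--             tmp.append(ProcessingTime[machine][enterJob]
--                        + DeteriorationProcessingTime[machine][enterJob][len(i)])
--         else:
--             tmp.append(ProcessingTime[machine][enterJob]
--                        + DeteriorationProcessingTime[machine][enterJob][0])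
--
--     return tmp.index(min(tmp))
-- ===== SOURCE B (Python) =====
-- def findBestLocation(chromosome, enterJob, rejectionPenalty, ProcessingTime,
--                      DeteriorationProcessingTime):
--     # Sort (cost, machine) pairs by cost with Python's stable sort and take the
--     # head: stability makes ties keep the smallest machine index, so the head's
--     # index is exactly the first position of the minimum cost.
--     n = len(chromosome)
--
--     def cost(machine, jobs):
--         if machine == n - 1:
--             return rejectionPenalty
--         return (ProcessingTime[machine][enterJob]
--                 + DeteriorationProcessingTime[machine][enterJob][len(jobs)])
--
--     pairs = sorted(((cost(m, jobs), m) for m, jobs in enumerate(chromosome)),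
--                    key=lambda p: p[0])
--     return pairs[0][1]
-- ===== Notes on version B (the rewrite author's own statement) =====
-- stated objective: alternative
-- what changed: B replaces A's build-cost-list / min() / list.index() triple scan with a sort-based argmin: it stably sorts the (cost, machine) pairs by cost and returns the index stored in the head pair (stability preserves A's first-minimum tie-break).
import Mathlib
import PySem

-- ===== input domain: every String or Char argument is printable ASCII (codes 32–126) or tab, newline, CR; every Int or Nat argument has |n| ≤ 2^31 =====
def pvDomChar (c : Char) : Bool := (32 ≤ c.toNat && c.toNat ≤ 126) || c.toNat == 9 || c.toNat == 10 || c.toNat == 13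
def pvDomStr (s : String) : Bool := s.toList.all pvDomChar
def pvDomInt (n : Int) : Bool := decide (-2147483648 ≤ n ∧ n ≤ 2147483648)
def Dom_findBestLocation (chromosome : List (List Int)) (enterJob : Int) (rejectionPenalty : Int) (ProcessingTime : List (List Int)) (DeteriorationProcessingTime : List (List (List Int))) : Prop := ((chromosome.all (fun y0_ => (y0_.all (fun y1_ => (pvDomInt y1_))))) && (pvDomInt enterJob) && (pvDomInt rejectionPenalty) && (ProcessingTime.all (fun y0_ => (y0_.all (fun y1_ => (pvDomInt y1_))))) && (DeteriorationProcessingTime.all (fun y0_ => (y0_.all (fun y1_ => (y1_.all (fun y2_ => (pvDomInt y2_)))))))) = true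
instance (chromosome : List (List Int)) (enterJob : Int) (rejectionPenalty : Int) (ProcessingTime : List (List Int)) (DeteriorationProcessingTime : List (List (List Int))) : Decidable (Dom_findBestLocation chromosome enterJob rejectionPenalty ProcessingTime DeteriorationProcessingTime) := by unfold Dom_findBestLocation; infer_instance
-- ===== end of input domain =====

-- B sorts the (cost, machine) pairs stably by cost and returns the head's index,
-- instead of A's build-list / min() / list.index(); same return value on Pre_.

-- ===== PORT A =====
-- A: build tmp (one appended cost per machine, three branches), then tmp.index(min(tmp)).
-- Out-of-range table indexing (Python IndexError) shows as pyGet? = none / .getD default;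
-- Pre_ excludes those inputs, and min([]) (ValueError) shows as min? [] = none.
def findBestLocation (chromosome : List (List Int)) (enterJob : Int) (rejectionPenalty : Int) (ProcessingTime : List (List Int)) (DeteriorationProcessingTime : List (List (List Int))) : Int :=
  let tmp : List Int :=
    (PySem.List.enumerate chromosome 0).foldl (fun tmp mi =>
      if mi.1 == (chromosome.length : Int) - 1 then
        tmp ++ [rejectionPenalty]
      else if mi.2 ≠ [] then
        tmp ++ [((PySem.List.pyGet? ((PySem.List.pyGet? ProcessingTime mi.1).getD []) enterJob).getD 0)
                + ((PySem.List.pyGet? ((PySem.List.pyGet? ((PySem.List.pyGet? DeteriorationProcessingTime mi.1).getD []) enterJob).getD []) (mi.2.length : Int)).getD 0)]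
      else
        tmp ++ [((PySem.List.pyGet? ((PySem.List.pyGet? ProcessingTime mi.1).getD []) enterJob).getD 0)
                + ((PySem.List.pyGet? ((PySem.List.pyGet? ((PySem.List.pyGet? DeteriorationProcessingTime mi.1).getD []) enterJob).getD []) (0 : Int)).getD 0)]) []
  match PySem.List.min? tmp (fun v => v) with
  | some m => ((PySem.List.index? tmp m).getD 0 : Nat)
  | none => 0       -- Python: min([]) raises ValueError; outside Pre_

-- ===== PORT B =====
-- B: map each machine to its (cost, machine) pair, stable-sort by cost, return head's index.
def findBestLocation_alt (chromosome : List (List Int)) (enterJob : Int) (rejectionPenalty : Int) (ProcessingTime : List (List Int)) (DeteriorationProcessingTime : List (List (List Int))) : Int :=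
  let n : Int := (chromosome.length : Int)
  let cost : Int → List Int → Int := fun machine jobs =>
    if machine == n - 1 then rejectionPenalty
    else ((PySem.List.pyGet? ((PySem.List.pyGet? ProcessingTime machine).getD []) enterJob).getD 0)
         + ((PySem.List.pyGet? ((PySem.List.pyGet? ((PySem.List.pyGet? DeteriorationProcessingTime machine).getD []) enterJob).getD []) (jobs.length : Int)).getD 0)
  let pairs : List (Int × Int) :=
    (PySem.List.enumerate chromosome 0).map (fun mi => (cost mi.1 mi.2, mi.1))
  match PySem.List.sorted pairs (fun p => p.1) with
  | p :: _ => p.2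
  | [] => 0       -- Python B: pairs[0] raises IndexError on empty chromosome; outside Pre_

-- ===== PRECONDITION & SPEC =====
-- per-machine index validity for the non-last machines (where A really indexes the tables)
def pvMachOK (chromosome : List (List Int)) (enterJob : Int) (ProcessingTime : List (List Int)) (DeteriorationProcessingTime : List (List (List Int))) (m : Nat) : Bool :=
  decide (m < ProcessingTime.length) &&
  (PySem.List.pyGet? (ProcessingTime.getD m []) enterJob).isSome &&
  decide (m < DeteriorationProcessingTime.length) &&
  (match PySem.List.pyGet? (DeteriorationProcessingTime.getD m []) enterJob with
   | some dd => decide ((chromosome.getD m []).length < dd.length)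
   | none => false)

-- Pre_ = exactly the inputs where Python A returns: nonempty chromosome and, for every
-- non-last machine, in-range table lookups (otherwise A raises ValueError/IndexError).
def Pre_findBestLocation (chromosome : List (List Int)) (enterJob : Int) (rejectionPenalty : Int) (ProcessingTime : List (List Int)) (DeteriorationProcessingTime : List (List (List Int))) : Prop :=
  chromosome ≠ [] ∧
  ∀ m ∈ List.range (chromosome.length - 1),
    pvMachOK chromosome enterJob ProcessingTime DeteriorationProcessingTime m = true
instance (chromosome : List (List Int)) (enterJob : Int) (rejectionPenalty : Int) (ProcessingTime : List (List Int)) (DeteriorationProcessingTime : List (List (List Int))) : Decidable (Pre_findBestLocation chromosome enterJob rejectionPenalty ProcessingTime DeteriorationProcessingTime) := by unfold Pre_findBestLocation; infer_instance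

def pvWitness_findBestLocation : List (List Int) × Int × Int × List (List Int) × List (List (List Int)) :=
  ([[], []], 0, 5, [[3]], [[[7]]])

def Spec_findBestLocation (chromosome : List (List Int)) (enterJob : Int) (rejectionPenalty : Int) (ProcessingTime : List (List Int)) (DeteriorationProcessingTime : List (List (List Int))) (out : Int) : Prop := out = findBestLocation_alt chromosome enterJob rejectionPenalty ProcessingTime DeteriorationProcessingTime
instance (chromosome : List (List Int)) (enterJob : Int) (rejectionPenalty : Int) (ProcessingTime : List (List Int)) (DeteriorationProcessingTime : List (List (List Int))) (out : Int) : Decidable (Spec_findBestLocation chromosome enterJob rejectionPenalty ProcessingTime DeteriorationProcessingTime out) := by unfold Spec_findBestLocation; infer_instance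

-- ===== CLAIM (what is proved, stated in full; the proofs are below) =====
def Claim_equal_findBestLocation : Prop := ∀ (chromosome : List (List Int)) (enterJob : Int) (rejectionPenalty : Int) (ProcessingTime : List (List Int)) (DeteriorationProcessingTime : List (List (List Int))), Dom_findBestLocation chromosome enterJob rejectionPenalty ProcessingTime DeteriorationProcessingTime → Pre_findBestLocation chromosome enterJob rejectionPenalty ProcessingTime DeteriorationProcessingTime → Spec_findBestLocation chromosome enterJob rejectionPenalty ProcessingTime DeteriorationProcessingTime (findBestLocation chromosome enterJob rejectionPenalty ProcessingTime DeteriorationProcessingTime)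

-- ===== LEMMAS AND PROOFS =====

lemma pv_foldl_min_le (l : List Int) (b : Int) : l.foldl min b ≤ b := by
  induction l generalizing b with
  | nil => simp
  | cons y u ih => exact le_trans (ih (min b y)) (min_le_left _ _)

lemma pv_foldl_min_mem (l : List Int) (b : Int) : l.foldl min b = b ∨ l.foldl min b ∈ l := by
  induction l generalizing b with
  | nil => left; rfl
  | cons y u ih =>
      rcases ih (min b y) with h | h
      · have hv : List.foldl min b (y :: u) = min b y := by simpa using h
        rcases le_total b y with hby | hyb
        · left; rw [hv, min_eq_left hby]
        · right; rw [hv, min_eq_right hyb]; exact List.mem_cons_self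
      · right
        have hv : List.foldl min b (y :: u) = List.foldl min (min b y) u := by simp
        rw [hv]; exact List.mem_cons_of_mem _ h

-- cost list indexed from s, for an arbitrary cost function g
def pvCL (g : Int → List Int → Int) : List (List Int) → Int → List Int
  | [], _ => []
  | x :: t, s => g s x :: pvCL g t (s + 1)

-- (cost, index) pair list from s (B's 'pairs')
def pvPL (g : Int → List Int → Int) : List (List Int) → Int → List (Int × Int)
  | [], _ => []
  | x :: t, s => (g s x, s) :: pvPL g t (s + 1)

-- the running-best recursion head of the insertion sort reduces to
def pvFM (g : Int → List Int → Int) : List (List Int) → Int → Int → Int → Int × Int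
  | [], _, bi, bc => (bi, bc)
  | x :: t, s, bi, bc =>
      if g s x < bc then pvFM g t (s + 1) s (g s x) else pvFM g t (s + 1) bi bc

lemma pvA_tmp (g : Int → List Int → Int) (xs : List (List Int)) (s : Int) (acc : List Int) :
    (PySem.List.enumerate xs s).foldl (fun tmp mi => tmp ++ [g mi.1 mi.2]) acc
      = acc ++ pvCL g xs s := by
  induction xs generalizing s acc with
  | nil => simp [pvCL, PySem.List.enumerate_nil]
  | cons x t ih => simp [pvCL, PySem.List.enumerate_cons, List.foldl_cons, ih]

lemma pvB_pairs (g : Int → List Int → Int) (xs : List (List Int)) (s : Int) :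
    (PySem.List.enumerate xs s).map (fun mi => (g mi.1 mi.2, mi.1)) = pvPL g xs s := by
  induction xs generalizing s with
  | nil => simp [pvPL, PySem.List.enumerate_nil]
  | cons x t ih => simp [pvPL, PySem.List.enumerate_cons, ih]

-- head of an insertion-sort fold over a nonempty accumulator = running best with 'before'
lemma pv_head_foldl_insertBy {α : Type} (before : α → α → Bool) (xs : List α) (h : α) (t : List α) :
    ∃ t', xs.foldl (fun acc x => PySem.List.insertBy before x acc) (h :: t)
      = (xs.foldl (fun b x => if before x b then x else b) h) :: t' := by
  induction xs generalizing h t with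
  | nil => exact ⟨t, rfl⟩
  | cons x u ih =>
      simp only [List.foldl_cons]
      by_cases hb : before x h = true
      · rw [show PySem.List.insertBy before x (h :: t) = x :: h :: t from by
            simp [PySem.List.insertBy, hb]]
        rw [if_pos hb]
        exact ih x (h :: t)
      · rw [show PySem.List.insertBy before x (h :: t) = h :: PySem.List.insertBy before x t from by
            simp [PySem.List.insertBy, hb]]
        rw [if_neg hb]
        exact ih h _

lemma pvPL_foldl (g : Int → List Int → Int) (xs : List (List Int)) (s bi bc : Int) :
    (pvPL g xs s).foldl (fun b x => if x.1 < b.1 then x else b) (bc, bi)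
      = ((pvFM g xs s bi bc).2, (pvFM g xs s bi bc).1) := by
  induction xs generalizing s bi bc with
  | nil => simp [pvPL, pvFM]
  | cons x t ih =>
      simp only [pvPL, pvFM, List.foldl_cons]
      by_cases h : g s x < bc
      · simp [h, ih]
      · simp [h, ih]

lemma pvFM_spec (g : Int → List Int → Int) (xs : List (List Int)) (s bi bc : Int) :
    pvFM g xs s bi bc =
      if (pvCL g xs s).foldl min bc = bc then (bi, bc)
      else (s + ((PySem.List.index? (pvCL g xs s) ((pvCL g xs s).foldl min bc)).getD 0 : Nat),
            (pvCL g xs s).foldl min bc) := by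
  induction xs generalizing s bi bc with
  | nil => simp [pvFM, pvCL]
  | cons x t ih =>
      simp only [pvFM, pvCL, List.foldl_cons]
      set c0 := g s x with hc0
      by_cases h : c0 < bc
      · have hmin : min bc c0 = c0 := min_eq_right (le_of_lt h)
        rw [hmin, if_pos h, ih]
        set M := (pvCL g t (s+1)).foldl min c0 with hM
        have hMle : M ≤ c0 := pv_foldl_min_le _ _
        have hMbc : M ≠ bc := by omega
        rw [if_neg hMbc]
        by_cases hMc : M = c0
        · rw [if_pos hMc, hMc]
          rw [PySem.List.index?_cons_self c0 (pvCL g t (s+1))]; simp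
        · rw [if_neg hMc]
          have hmem : M ∈ pvCL g t (s+1) := by
            rcases pv_foldl_min_mem (pvCL g t (s+1)) c0 with h1 | h1
            · exact absurd h1 hMc
            · exact h1
          obtain ⟨k, hk⟩ := Option.isSome_iff_exists.mp
            ((PySem.List.index?_isSome_iff _ _).mpr hmem)
          have hne : c0 ≠ M := fun e => hMc e.symm
          rw [PySem.List.index?_cons_of_ne _ hne, hk]
          simp only [Option.map_some, Option.getD_some, Prod.mk.injEq]
          exact ⟨by push_cast; ring, trivial⟩
      · have hmin : min bc c0 = bc := min_eq_left (not_lt.mp h)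
        rw [hmin, if_neg h, ih]
        set M := (pvCL g t (s+1)).foldl min bc with hM
        by_cases hMb : M = bc
        · rw [if_pos hMb, if_pos hMb]
        · rw [if_neg hMb, if_neg hMb]
          have hMle : M ≤ bc := pv_foldl_min_le _ _
          have hMc : c0 ≠ M := by
            have : bc ≤ c0 := not_lt.mp h
            intro e; omega
          have hmem : M ∈ pvCL g t (s+1) := by
            rcases pv_foldl_min_mem (pvCL g t (s+1)) bc with h1 | h1
            · exact absurd h1 hMb
            · exact h1
          obtain ⟨k, hk⟩ := Option.isSome_iff_exists.mp
            ((PySem.List.index?_isSome_iff _ _).mpr hmem)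
          rw [PySem.List.index?_cons_of_ne _ hMc, hk]
          simp only [Option.map_some, Option.getD_some, Prod.mk.injEq]
          exact ⟨by push_cast; ring, trivial⟩

-- ===== VERDICT (by name: the statement is the Claim_ definition above) =====
theorem findBestLocation_spec : Claim_equal_findBestLocation := by
  intro chromosome enterJob rejectionPenalty ProcessingTime DeteriorationProcessingTime _hdom hpre
  obtain ⟨hne, -⟩ := hpre
  obtain ⟨x0, rest, rfl⟩ : ∃ x0 rest, chromosome = x0 :: rest := by
    cases chromosome with
    | nil => exact absurd rfl hne
    | cons a b => exact ⟨a, b, rfl⟩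
  unfold Spec_findBestLocation findBestLocation findBestLocation_alt
  dsimp only
  set g : Int → List Int → Int := fun m i =>
      if m == (((x0 :: rest).length : Nat) : Int) - 1 then rejectionPenalty
      else ((PySem.List.pyGet? ((PySem.List.pyGet? ProcessingTime m).getD []) enterJob).getD 0)
           + ((PySem.List.pyGet? ((PySem.List.pyGet? ((PySem.List.pyGet? DeteriorationProcessingTime m).getD []) enterJob).getD []) (i.length : Int)).getD 0)
    with hg
  -- A's loop body builds exactly the cost list of g (the two non-last branches coincide:
  -- when mi.2 = [], mi.2.length = 0)
  have hbody :
      (fun (tmp : List Int) (mi : Int × List Int) =>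
        if mi.1 == (((x0 :: rest).length : Nat) : Int) - 1 then
          tmp ++ [rejectionPenalty]
        else if mi.2 ≠ [] then
          tmp ++ [((PySem.List.pyGet? ((PySem.List.pyGet? ProcessingTime mi.1).getD []) enterJob).getD 0)
                  + ((PySem.List.pyGet? ((PySem.List.pyGet? ((PySem.List.pyGet? DeteriorationProcessingTime mi.1).getD []) enterJob).getD []) (mi.2.length : Int)).getD 0)]
        else
          tmp ++ [((PySem.List.pyGet? ((PySem.List.pyGet? ProcessingTime mi.1).getD []) enterJob).getD 0)
                  + ((PySem.List.pyGet? ((PySem.List.pyGet? ((PySem.List.pyGet? DeteriorationProcessingTime mi.1).getD []) enterJob).getD []) (0 : Int)).getD 0)])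
      = (fun tmp mi => tmp ++ [g mi.1 mi.2]) := by
    funext tmp mi
    rw [hg]
    beta_reduce
    split_ifs with h1 h2
    · rfl
    · rfl
    · rw [ne_eq, not_not] at h2
      rw [h2]
      norm_num
  rw [hbody, pvA_tmp g (x0 :: rest) 0 []]
  have hcl : pvCL g (x0 :: rest) 0 = g 0 x0 :: pvCL g rest 1 := by
    rw [pvCL]; norm_num
  rw [List.nil_append, hcl]
  -- B's pairs are the (cost, index) list of the same g
  have hpairs :
      (PySem.List.enumerate (x0 :: rest) 0).map
        (fun mi => ((fun machine jobs =>
            if machine == (((x0 :: rest).length : Nat) : Int) - 1 then rejectionPenalty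
            else ((PySem.List.pyGet? ((PySem.List.pyGet? ProcessingTime machine).getD []) enterJob).getD 0)
                 + ((PySem.List.pyGet? ((PySem.List.pyGet? ((PySem.List.pyGet? DeteriorationProcessingTime machine).getD []) enterJob).getD []) (jobs.length : Int)).getD 0))
            mi.1 mi.2, mi.1))
      = (g 0 x0, 0) :: pvPL g rest 1 := by
    rw [show (fun (mi : Int × List Int) => ((fun machine jobs =>
            if machine == (((x0 :: rest).length : Nat) : Int) - 1 then rejectionPenalty
            else ((PySem.List.pyGet? ((PySem.List.pyGet? ProcessingTime machine).getD []) enterJob).getD 0)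
                 + ((PySem.List.pyGet? ((PySem.List.pyGet? ((PySem.List.pyGet? DeteriorationProcessingTime machine).getD []) enterJob).getD []) (jobs.length : Int)).getD 0))
            mi.1 mi.2, mi.1))
          = (fun mi => (g mi.1 mi.2, mi.1)) from by rw [hg]]
    rw [pvB_pairs g (x0 :: rest) 0]
    rw [pvPL]; norm_num
  rw [hpairs]
  -- sorted = insertion-sort fold; its head is the strict running best over the pairs
  rw [PySem.List.sorted_eq_foldl_insertBy]
  rw [List.foldl_cons]
  rw [show PySem.List.insertBy (fun a b : Int × Int => decide (a.1 < b.1)) (g 0 x0, 0) [] = [(g 0 x0, 0)] from by simp [PySem.List.insertBy]]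
  obtain ⟨t', ht'⟩ := pv_head_foldl_insertBy (fun a b : Int × Int => decide (a.1 < b.1)) (pvPL g rest 1) (g 0 x0, 0) []
  rw [ht']
  dsimp only
  have hfold :
      (pvPL g rest 1).foldl
          (fun b x => if (fun a b : Int × Int => decide (a.1 < b.1)) x b = true then x else b)
          (g 0 x0, 0)
        = ((pvFM g rest 1 0 (g 0 x0)).2, (pvFM g rest 1 0 (g 0 x0)).1) := by
    rw [show (fun (b x : Int × Int) => if (fun a b : Int × Int => decide (a.1 < b.1)) x b = true then x else b)
          = (fun b x => if x.1 < b.1 then x else b) from by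
        funext b x; simp]
    exact pvPL_foldl g rest 1 0 (g 0 x0)
  rw [hfold]
  dsimp only
  rw [PySem.List.min?_id_cons]
  dsimp only
  set c0 := g 0 x0 with hc0
  set L := pvCL g rest 1 with hL
  set M := L.foldl min c0 with hM
  rw [pvFM_spec]
  by_cases hMc : M = c0
  · rw [← hL, ← hM, if_pos hMc, hMc, PySem.List.index?_cons_self]
    simp
  · rw [← hL, ← hM, if_neg hMc]
    have hmem : M ∈ L := by
      rcases pv_foldl_min_mem L c0 with h1 | h1
      · exact absurd h1 hMc
      · exact h1
    obtain ⟨k, hk⟩ := Option.isSome_iff_exists.mp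
      ((PySem.List.index?_isSome_iff _ _).mpr hmem)
    have hne : c0 ≠ M := fun e => hMc e.symm
    rw [PySem.List.index?_cons_of_ne _ hne, hk]
    simp only [Option.map_some, Option.getD_some]
    push_cast
    ring
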